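-- pv_equiv track=rewrite | github.com/granadu0417-crypto/edu-guide | add_cta_to_content.py | find_middle_position
-- ===== SOURCE A (Python) =====
-- def find_middle_position(lines):
--     """글의 중간 지점 찾기 (본문의 50% 지점)"""
--     # Front matter 이후 시작
--     content_start = 0
--     in_front_matter = False
--     front_matter_count = 0
--
--     for i, line in enumerate(lines):
--         if line.strip() == '---':
--             front_matter_count += 1
--             if front_matter_count == 2:
--                 content_start = i + 1
--                 break
--
--     # 본문만 카운트
--     content_lines = lines[content_start:]
--
--     # 이미지, 제목 등을 제외한 실제 본문 라인 찾기
--     substantial_lines = []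
--     for i, line in enumerate(content_lines, start=content_start):
--         line_stripped = line.strip()
--         # 실질적인 본문 라인인지 확인
--         if (line_stripped and
--             not line_stripped.startswith('#') and
--             not line_stripped.startswith('!') and
--             not line_stripped.startswith('```') and
--             not line_stripped.startswith('---') and
--             not line_stripped.startswith('*') and
--             len(line_stripped) > 50):  # 충분히 긴 라인만
--             substantial_lines.append(i)
--
--     if substantial_lines:
--         # 중간 지점 반환
--         middle_idx = len(substantial_lines) // 2
--         return substantial_lines[middle_idx]
--
--     # 대체: 전체 콘텐츠의 50% 지점
--     total_lines = len(lines)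
--     return content_start + (total_lines - content_start) // 2
-- ===== SOURCE B (Python) =====
-- def find_middle_position(lines):
--     """글의 중간 지점 찾기 (본문의 50% 지점)"""
--     # Single fused pass: collect substantial-line indices as we go; when the
--     # second '---' is seen, record the content start and discard what was
--     # collected before it (A only counts lines after the front matter then).
--     dashes = 0
--     content_start = 0
--     subs = []
--     for i, line in enumerate(lines):
--         s = line.strip()
--         if dashes < 2 and s == '---':
--             dashes += 1
--             if dashes == 2:
--                 content_start = i + 1
--                 subs = []
--             continue
--         if (s and not s.startswith('#') and not s.startswith('!')
--                 and not s.startswith('```') and not s.startswith('---')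
--                 and not s.startswith('*') and len(s) > 50):
--             subs.append(i)
--     if subs:
--         return subs[len(subs) // 2]
--     return content_start + (len(lines) - content_start) // 2
-- ===== Notes on version B (the rewrite author's own statement) =====
-- stated objective: alternative
-- what changed: Replaces A's two-phase scheme (a first loop locating the index after the second '---', then a second scan over the slice lines[content_start:]) with one fused pass that collects substantial-line indices as it goes and clears the collected list when the second '---' is reached.
import Mathlib
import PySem

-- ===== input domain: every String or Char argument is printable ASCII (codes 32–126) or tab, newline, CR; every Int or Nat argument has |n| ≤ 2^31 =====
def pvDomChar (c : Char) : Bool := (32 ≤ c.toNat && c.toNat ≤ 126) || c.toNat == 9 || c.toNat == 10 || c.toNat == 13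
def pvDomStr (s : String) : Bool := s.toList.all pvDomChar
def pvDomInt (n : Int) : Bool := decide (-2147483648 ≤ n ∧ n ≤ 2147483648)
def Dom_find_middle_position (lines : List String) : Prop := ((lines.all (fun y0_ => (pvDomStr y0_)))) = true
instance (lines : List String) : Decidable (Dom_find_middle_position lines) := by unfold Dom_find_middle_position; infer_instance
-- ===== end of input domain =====

-- B is a single fused pass (dash counter + collected indices, cleared at the second '---')
-- instead of A's find-start loop followed by a second scan over the slice; same return value.

-- ===== PORT A =====
-- shared predicate: the 'substantial content line' test both Pythons apply to a raw line
def isSubstantial (line : String) : Bool :=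
  let s := PySem.Str.strip line
  s ≠ "" && !PySem.Str.startswith s "#" && !PySem.Str.startswith s "!" &&
  !PySem.Str.startswith s "```" && !PySem.Str.startswith s "---" &&
  !PySem.Str.startswith s "*" && decide (50 < PySem.Str.len s)

-- A's first loop: index after the second '---' line, else 0 (content_start)
def findStartA : Nat → Nat → List String → Nat
  | _, _, [] => 0
  | i, c, l :: rest =>
      if PySem.Str.strip l = "---" then
        if c + 1 = 2 then i + 1 else findStartA (i + 1) (c + 1) rest
      else findStartA (i + 1) c rest

-- A's second loop: indices (enumerated from cs) of substantial lines
def collectA : Nat → List String → List Int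
  | _, [] => []
  | i, l :: rest =>
      if isSubstantial l then (i : Int) :: collectA (i + 1) rest
      else collectA (i + 1) rest

def find_middle_position (lines : List String) : Int :=
  let cs := findStartA 0 0 lines
  let subs := collectA cs (lines.drop cs)
  if subs.isEmpty then (cs : Int) + PySem.Int.floordiv ((lines.length : Int) - (cs : Int)) 2
  else subs.getD (subs.length / 2) 0

-- ===== PORT B =====
-- B's single pass: state = (index, dash count, content_start, collected indices)
def bLoop : Nat → Nat → Nat → List Int → List String → Nat × List Int
  | _, _, cs, subs, [] => (cs, subs)
  | i, d, cs, subs, l :: rest =>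
      if d < 2 ∧ PySem.Str.strip l = "---" then
        if d + 1 = 2 then bLoop (i + 1) (d + 1) (i + 1) [] rest
        else bLoop (i + 1) (d + 1) cs subs rest
      else if isSubstantial l then bLoop (i + 1) d cs (subs ++ [(i : Int)]) rest
      else bLoop (i + 1) d cs subs rest

def find_middle_position_alt (lines : List String) : Int :=
  let r := bLoop 0 0 0 [] lines
  if r.2.isEmpty then (r.1 : Int) + PySem.Int.floordiv ((lines.length : Int) - (r.1 : Int)) 2
  else r.2.getD (r.2.length / 2) 0

-- ===== PRECONDITION & SPEC =====
def Spec_find_middle_position (lines : List String) (out : Int) : Prop := out = find_middle_position_alt lines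
instance (lines : List String) (out : Int) : Decidable (Spec_find_middle_position lines out) := by unfold Spec_find_middle_position; infer_instance

-- ===== CLAIM (what is proved, stated in full; the proofs are below) =====
def Claim_equal_find_middle_position : Prop := ∀ (lines : List String), Dom_find_middle_position lines → Spec_find_middle_position lines (find_middle_position lines)

-- ===== LEMMAS AND PROOFS =====

lemma isSubstantial_dash (l : String) (h : PySem.Str.strip l = "---") : isSubstantial l = false := by
  simp [isSubstantial, h]

lemma findStartA_pos (rest : List String) : ∀ i c, findStartA i c rest = 0 ∨ i < findStartA i c rest := by
  induction rest with
  | nil => intro i c; left; rfl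
  | cons l rest ih =>
      intro i c
      simp only [findStartA]
      split
      · split
        · right; omega
        · rcases ih (i+1) (c+1) with h | h
          · left; exact h
          · right; omega
      · rcases ih (i+1) c with h | h
        · left; exact h
        · right; omega

lemma bLoop_two (rest : List String) : ∀ i cs subs,
    bLoop i 2 cs subs rest = (cs, subs ++ collectA i rest) := by
  induction rest with
  | nil => intro i cs subs; simp [bLoop, collectA]
  | cons l rest ih =>
      intro i cs subs
      simp only [bLoop, collectA]
      have h2 : ¬ (2 < 2 ∧ PySem.Str.strip l = "---") := by omega
      rw [if_neg h2]
      by_cases hs : isSubstantial l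
      · rw [if_pos hs, if_pos hs, ih]; simp
      · rw [if_neg hs, if_neg hs, ih]

lemma bLoop_main (rest : List String) : ∀ i d subs, d ≤ 1 →
    bLoop i d 0 subs rest =
      (findStartA i d rest,
       if findStartA i d rest = 0 then subs ++ collectA i rest
       else collectA (findStartA i d rest) (rest.drop (findStartA i d rest - i))) := by
  induction rest with
  | nil => intro i d subs _; simp [bLoop, findStartA, collectA]
  | cons l rest ih =>
      intro i d subs hd
      simp only [bLoop, findStartA]
      by_cases hdash : PySem.Str.strip l = "---"
      · rw [if_pos ⟨by omega, hdash⟩, if_pos hdash]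
        by_cases h2 : d + 1 = 2
        · rw [if_pos h2, if_pos h2]
          have : d + 1 = 2 := h2
          rw [show d + 1 = 2 from h2, bLoop_two]
          have hne : ¬ (i + 1 = 0) := by omega
          rw [if_neg hne]
          simp
        · rw [if_neg h2, if_neg h2]
          have hd1 : d + 1 ≤ 1 := by omega
          rw [ih (i+1) (d+1) subs hd1]
          have hcol : collectA i (l :: rest) = collectA (i+1) rest := by
            simp [collectA, isSubstantial_dash l hdash]
          by_cases hz : findStartA (i+1) (d+1) rest = 0
          · rw [if_pos hz, if_pos hz, hcol]
          · rw [if_neg hz, if_neg hz]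
            have hlt : i + 1 < findStartA (i+1) (d+1) rest := by
              rcases findStartA_pos rest (i+1) (d+1) with h | h
              · exact absurd h hz
              · exact h
            have : findStartA (i+1) (d+1) rest - i = (findStartA (i+1) (d+1) rest - (i+1)) + 1 := by omega
            rw [this]
            rfl
      · have hng : ¬ (d < 2 ∧ PySem.Str.strip l = "---") := by
          intro h; exact hdash h.2
        rw [if_neg hng, if_neg hdash]
        have step : ∀ subs', bLoop (i+1) d 0 subs' rest =
            (findStartA (i+1) d rest,
             if findStartA (i+1) d rest = 0 then subs' ++ collectA (i+1) rest
             else collectA (findStartA (i+1) d rest) (rest.drop (findStartA (i+1) d rest - (i+1)))) :=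
          fun subs' => ih (i+1) d subs' hd
        have hdrop : ¬ findStartA (i+1) d rest = 0 →
            (l :: rest).drop (findStartA (i+1) d rest - i) = rest.drop (findStartA (i+1) d rest - (i+1)) := by
          intro hz
          have hlt : i + 1 < findStartA (i+1) d rest := by
            rcases findStartA_pos rest (i+1) d with h | h
            · exact absurd h hz
            · exact h
          have : findStartA (i+1) d rest - i = (findStartA (i+1) d rest - (i+1)) + 1 := by omega
          rw [this]; rfl
        by_cases hs : isSubstantial l
        · rw [if_pos hs, step]
          simp only [collectA, if_pos hs]
          by_cases hz : findStartA (i+1) d rest = 0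
          · rw [if_pos hz, if_pos hz]; simp
          · rw [if_neg hz, if_neg hz, hdrop hz]
        · rw [if_neg hs, step]
          simp only [collectA, if_neg hs]
          by_cases hz : findStartA (i+1) d rest = 0
          · rw [if_pos hz, if_pos hz]
          · rw [if_neg hz, if_neg hz, hdrop hz]

lemma bLoop_eq_A (lines : List String) :
    bLoop 0 0 0 [] lines = (findStartA 0 0 lines, collectA (findStartA 0 0 lines) (lines.drop (findStartA 0 0 lines))) := by
  rw [bLoop_main lines 0 0 [] (by omega)]
  by_cases hz : findStartA 0 0 lines = 0
  · rw [if_pos hz, hz]; simp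
  · rw [if_neg hz]; simp

-- ===== VERDICT (by name: the statement is the Claim_ definition above) =====
theorem find_middle_position_spec : Claim_equal_find_middle_position := by
  intro lines _
  show find_middle_position lines = find_middle_position_alt lines
  simp only [find_middle_position, find_middle_position_alt, bLoop_eq_A]
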